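-- pv_equiv track=rewrite | github.com/KotegovAlex/AlgorithmTraining | homeworks/hw1/details.py | details
-- ===== SOURCE A (Python) =====
-- def details(n: int, k: int, m: int, res: int = 0) -> int:
--     if n < k or m > k:
--         return 0
--     k_num = n // k
--     m_num = k // m
--     ost = n - k_num * m_num * m
--     res = k_num * m_num
--     res += details(ost, k, m, res)
--     return res
-- ===== SOURCE B (Python) =====
-- def details(n: int, k: int, m: int, res: int = 0) -> int:
--     # closed form: each batch of k//m details consumes k - k%m material;
--     # when k%m <= 0 the reduction empties in one step, otherwise solve directly
--     if n < k or m > k: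
--         return 0
--     r = k % m
--     if r > 0:
--         batches = (n - k) // (k - r) + 1
--     else:
--         batches = n // k
--     return (k // m) * batches
-- ===== Notes on version B (the rewrite author's own statement) =====
-- stated objective: faster
-- what changed: Replaced the O(n/k) recursion by an O(1) closed form: each produced batch of k//m details consumes k - k%m material, so the batch count is (n-k)//(k-(k%m)) + 1 when k%m > 0 and n//k otherwise (the reduction then empties in one step).
import Mathlib
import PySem

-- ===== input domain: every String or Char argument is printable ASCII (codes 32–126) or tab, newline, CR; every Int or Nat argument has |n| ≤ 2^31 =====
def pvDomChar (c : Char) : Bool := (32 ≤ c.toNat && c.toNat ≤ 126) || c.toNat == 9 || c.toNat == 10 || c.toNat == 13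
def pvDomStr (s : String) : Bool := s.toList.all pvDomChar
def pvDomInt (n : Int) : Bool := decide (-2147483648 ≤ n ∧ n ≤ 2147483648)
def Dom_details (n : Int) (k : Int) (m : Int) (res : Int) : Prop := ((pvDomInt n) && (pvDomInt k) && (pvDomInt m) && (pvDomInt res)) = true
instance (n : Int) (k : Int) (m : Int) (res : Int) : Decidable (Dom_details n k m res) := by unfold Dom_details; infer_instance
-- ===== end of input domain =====

-- B replaces A's O(n/k) recursion by an O(1) closed-form count of produced batches; objective: faster.

-- ===== PORT A =====
-- fuel makes the recursion total in Lean; on every input admitted by Pre_details the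
-- fuel n.toNat + 1 exceeds the true recursion depth (n strictly decreases each call),
-- so this computes exactly what the Python recursion returns there
def detailsFuel : Nat → Int → Int → Int → Int → Int
  | 0, _, _, _, _ => 0
  | fuel + 1, n, k, m, _res =>
    if n < k ∨ m > k then 0
    else
      let k_num := PySem.Int.floordiv n k
      let m_num := PySem.Int.floordiv k m
      let ost := n - k_num * m_num * m
      let res := k_num * m_num
      res + detailsFuel fuel ost k m res

def details (n : Int) (k : Int) (m : Int) (res : Int) : Int :=
  detailsFuel (n.toNat + 1) n k m res

-- ===== PORT B =====
-- closed form: each batch of k//m details consumes k - k%m material;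
-- when k%m ≤ 0 the reduction empties in one step, otherwise solve directly
def details_alt (n : Int) (k : Int) (m : Int) (res : Int) : Int :=
  if n < k ∨ m > k then 0
  else
    let r := PySem.Int.mod k m
    let batches :=
      if r > 0 then PySem.Int.floordiv (n - k) (k - r) + 1
      else PySem.Int.floordiv n k
    PySem.Int.floordiv k m * batches

-- ===== PRECONDITION & SPEC =====
-- Pre_details is exactly the set of inputs where the Python A returns: outside it A raises
-- ZeroDivisionError (k = 0 or m = 0 reached past the guard) or RecursionError (k < 0 past the guard).
def Pre_details (n : Int) (k : Int) (m : Int) (res : Int) : Prop :=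
  (n < k ∨ m > k) ∨ (0 < k ∧ m ≠ 0)
instance (n : Int) (k : Int) (m : Int) (res : Int) : Decidable (Pre_details n k m res) := by
  unfold Pre_details; infer_instance

def pvWitness_details : Int × Int × Int × Int := (20, 5, 2, 0)

def Spec_details (n : Int) (k : Int) (m : Int) (res : Int) (out : Int) : Prop := out = details_alt n k m res
instance (n : Int) (k : Int) (m : Int) (res : Int) (out : Int) : Decidable (Spec_details n k m res out) := by
  unfold Spec_details; infer_instance

-- ===== CLAIM (what is proved, stated in full; the proofs are below) =====
def Claim_equal_details : Prop := ∀ (n : Int) (k : Int) (m : Int) (res : Int), Dom_details n k m res → Pre_details n k m res → Spec_details n k m res (details n k m res)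

-- ===== LEMMAS AND PROOFS =====

-- any positive fuel of A's recursion returns 0 once the guard fires
theorem detailsFuel_base (fuel : Nat) (n k m res : Int) (hf : 0 < fuel)
    (h : n < k ∨ m > k) : detailsFuel fuel n k m res = 0 := by
  cases fuel with
  | zero => omega
  | succ f => simp only [detailsFuel]; rw [if_pos h]

-- the closed-form batch count (proof-side abbreviation; d stands for k - k%m)
def Tcl (k d n : Int) : Int := if n < k then 0 else (n - k) / d + 1

theorem Tcl_step (k d n : Int) (hd : 0 < d) (hn : k ≤ n) :
    Tcl k d n = 1 + Tcl k d (n - d) := by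
  unfold Tcl
  rw [if_neg (by omega)]
  by_cases h : n - d < k
  · rw [if_pos h]
    have h0 : (n - k) / d = 0 := Int.ediv_eq_zero_of_lt (by omega) (by omega)
    omega
  · rw [if_neg h]
    have h1 : n - k = (n - d - k) + 1 * d := by ring
    rw [h1, Int.add_mul_ediv_right _ _ (by omega : d ≠ 0)]
    ring

theorem Tcl_peel (k d : Int) (hd : 0 < d) :
    ∀ (j : Nat) (n : Int), k ≤ n + d - (j : Int) * d →
      Tcl k d n = j + Tcl k d (n - j * d) := by
  intro j
  induction j with
  | zero => intro n _; simp
  | succ i ih =>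
    intro n hcond
    have hi : (0:Int) ≤ (i : Int) * d := by positivity
    have hn : k ≤ n := by push_cast at hcond ⊢; nlinarith
    rw [Tcl_step k d n hd hn, ih (n - d) (by push_cast at hcond ⊢; linarith)]
    push_cast
    ring_nf

-- with 0 < m ≤ k, A's recursion equals (k//m) * Tcl for sufficient fuel
theorem detailsFuel_eq_Tcl (k m : Int) (hk : 0 < k) (hm : 0 < m) (hmk : m ≤ k) :
    ∀ (fuel : Nat) (n res : Int), n.toNat < fuel →
      detailsFuel fuel n k m res =
        PySem.Int.floordiv k m * Tcl k (k - PySem.Int.mod k m) n := by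
  have hr0 : 0 ≤ PySem.Int.mod k m := PySem.Int.mod_nonneg k hm
  have hrm : PySem.Int.mod k m < m := PySem.Int.mod_lt k hm
  have hqm : PySem.Int.floordiv k m * m = k - PySem.Int.mod k m := by
    have := PySem.Int.floordiv_mul_add_mod k m; omega
  have hd : 0 < k - PySem.Int.mod k m := by omega
  have hdk : k - PySem.Int.mod k m ≤ k := by omega
  intro fuel
  induction fuel with
  | zero => intro n res h; omega
  | succ f ih =>
    intro n res hfuel
    by_cases hnk : n < k
    · rw [detailsFuel_base _ _ _ _ _ (by omega) (Or.inl hnk)]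
      unfold Tcl; rw [if_pos hnk]; ring
    · push_neg at hnk
      show (if n < k ∨ m > k then 0 else
          PySem.Int.floordiv n k * PySem.Int.floordiv k m +
            detailsFuel f (n - PySem.Int.floordiv n k * PySem.Int.floordiv k m * m) k m
              (PySem.Int.floordiv n k * PySem.Int.floordiv k m)) =
        PySem.Int.floordiv k m * Tcl k (k - PySem.Int.mod k m) n
      rw [if_neg (by omega), PySem.Int.floordiv_eq_ediv_of_pos hk]
      have hlow : n / k * k ≤ n := Int.ediv_mul_le n (by omega)
      have hhigh : n < (n / k + 1) * k := Int.lt_ediv_add_one_mul_self n hk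
      have hkn1 : 1 ≤ n / k := by nlinarith
      have host : n / k * PySem.Int.floordiv k m * m = n / k * (k - PySem.Int.mod k m) := by
        rw [mul_assoc, hqm]
      rw [host]
      have hostub : n - n / k * (k - PySem.Int.mod k m) ≤ n - (k - PySem.Int.mod k m) := by
        nlinarith
      have hostlb : 0 ≤ n - n / k * (k - PySem.Int.mod k m) := by nlinarith
      rw [ih (n - n / k * (k - PySem.Int.mod k m)) (n / k * PySem.Int.floordiv k m) (by omega)]
      have hc : ((n / k).toNat : Int) = n / k := Int.toNat_of_nonneg (by omega)
      have hpeel : Tcl k (k - PySem.Int.mod k m) n =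
          ((n / k).toNat : Int) +
            Tcl k (k - PySem.Int.mod k m) (n - ((n / k).toNat : Int) * (k - PySem.Int.mod k m)) := by
        apply Tcl_peel k (k - PySem.Int.mod k m) hd
        rw [hc]; nlinarith
      rw [hc] at hpeel
      rw [hpeel]; ring

-- ===== VERDICT (by name: the statement is the Claim_ definition above) =====
theorem details_spec : Claim_equal_details := by
  intro n k m res _ hpre
  unfold Spec_details details details_alt
  by_cases hg : n < k ∨ m > k
  · rw [if_pos hg, detailsFuel_base _ _ _ _ _ (by omega) hg]
  · rw [if_neg hg]
    push_neg at hg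
    obtain ⟨hnk, hmk⟩ := hg
    rcases hpre with hguard | ⟨hk, hm0⟩
    · omega
    show detailsFuel (n.toNat + 1) n k m res =
      PySem.Int.floordiv k m *
        (if PySem.Int.mod k m > 0 then
            PySem.Int.floordiv (n - k) (k - PySem.Int.mod k m) + 1
          else PySem.Int.floordiv n k)
    by_cases hm : 0 < m
    · -- positive m: the closed form via Tcl
      rw [detailsFuel_eq_Tcl k m hk hm hmk (n.toNat + 1) n res (by omega)]
      have hr0 : 0 ≤ PySem.Int.mod k m := PySem.Int.mod_nonneg k hm
      have hrm : PySem.Int.mod k m < m := PySem.Int.mod_lt k hm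
      have hd : 0 < k - PySem.Int.mod k m := by omega
      unfold Tcl
      rw [if_neg (by omega)]
      by_cases hr : PySem.Int.mod k m > 0
      · rw [if_pos hr, PySem.Int.floordiv_eq_ediv_of_pos hd]
      · rw [if_neg hr, PySem.Int.floordiv_eq_ediv_of_pos hk]
        have hrz : PySem.Int.mod k m = 0 := by omega
        rw [hrz, sub_zero]
        have h2 : (n - k) / k + 1 = n / k := by
          have h1 : n = n - k + 1 * k := by ring
          conv_rhs => rw [h1]
          rw [Int.add_mul_ediv_right _ _ (by omega : k ≠ 0)]
        rw [h2]
    · -- negative m: the recursion empties in a single step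
      have hmneg : m < 0 := by omega
      have hrb := PySem.Int.mod_neg_bounds k hmneg
      rw [if_neg (by omega : ¬ PySem.Int.mod k m > 0)]
      show (if n < k ∨ m > k then 0 else
          PySem.Int.floordiv n k * PySem.Int.floordiv k m +
            detailsFuel n.toNat (n - PySem.Int.floordiv n k * PySem.Int.floordiv k m * m) k m
              (PySem.Int.floordiv n k * PySem.Int.floordiv k m)) =
        PySem.Int.floordiv k m * PySem.Int.floordiv n k
      rw [if_neg (by omega), PySem.Int.floordiv_eq_ediv_of_pos hk]
      have hqm : PySem.Int.floordiv k m * m = k - PySem.Int.mod k m := by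
        have := PySem.Int.floordiv_mul_add_mod k m; omega
      have hlow : n / k * k ≤ n := Int.ediv_mul_le n (by omega)
      have hhigh : n < (n / k + 1) * k := Int.lt_ediv_add_one_mul_self n hk
      have hkn1 : 1 ≤ n / k := by nlinarith
      have hostlt : n - n / k * PySem.Int.floordiv k m * m < k := by
        rw [mul_assoc, hqm]
        have hnp : n / k * PySem.Int.mod k m ≤ 0 :=
          mul_nonpos_of_nonneg_of_nonpos (by omega) hrb.2
        nlinarith
      rw [detailsFuel_base _ _ _ _ _ (by omega) (Or.inl hostlt)]
      ring
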